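-- pv_equiv track=rewrite | github.com/cxyfer/OJ | Leetcode/@Contest/Weekly/Weekly Contest 486/d.py | nthSmallest
-- ===== SOURCE A (Python) =====
-- import math
--
-- def nthSmallest(n: int, k: int) -> int:
--     ans = 0
--     for b in range(60, -1, -1):
--         cnt = math.comb(b, k)
--         if cnt < n:
--             ans |= (1 << b)
--             n -= cnt
--             k -= 1
--             if k == 0:
--                 break
--     return ans
-- ===== SOURCE B (Python) =====
-- import math
--
-- def nthSmallest(n: int, k: int) -> int:
--     # Binary search over candidate values: the answer is the smallest
--     # x in [0, 2**61 - 1] such that at least n numbers in [0, x] have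
--     # exactly k set bits; count_le ranks a candidate combinatorially.
--     def count_le(x: int) -> int:
--         res = 0
--         need = k
--         for b in range(60, -1, -1):
--             if x >= (1 << b):
--                 x -= (1 << b)
--                 if need >= 0:
--                     res += math.comb(b, need)
--                 need -= 1
--         return res + (1 if need == 0 else 0)
--
--     lo, hi = 0, (1 << 61) - 1
--     while lo < hi:
--         mid = (lo + hi) // 2
--         if count_le(mid) >= n:
--             hi = mid
--         else:
--             lo = mid + 1
--     return lo
-- ===== Notes on version B (the rewrite author's own statement) =====
-- stated objective: alternative
-- what changed: Replaces A's greedy combinatorial unranking scan (which subtracts binomial counts from n while building the answer bit by bit) with a binary search over candidate values, driven by a counting function that ranks a candidate x (how many numbers <= x have exactly k set bits).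
-- intended difference: For 1 <= k <= 60 with n > comb(61,k) the requested rank exceeds the number of 61-bit values with k set bits, so no answer exists: A silently returns the truncated greedy value 2^61 - 2^(61-k), which looks like a valid answer but has the wrong rank, while B returns 2^61 - 1, the saturated top of its search range; on this unspecified corner B's saturation is the natural outcome of its search and at least as defensible as A's truncation. — e.g. on nthSmallest(62, 1): A returns 1152921504606846976, B returns 2305843009213693951
import Mathlib
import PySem

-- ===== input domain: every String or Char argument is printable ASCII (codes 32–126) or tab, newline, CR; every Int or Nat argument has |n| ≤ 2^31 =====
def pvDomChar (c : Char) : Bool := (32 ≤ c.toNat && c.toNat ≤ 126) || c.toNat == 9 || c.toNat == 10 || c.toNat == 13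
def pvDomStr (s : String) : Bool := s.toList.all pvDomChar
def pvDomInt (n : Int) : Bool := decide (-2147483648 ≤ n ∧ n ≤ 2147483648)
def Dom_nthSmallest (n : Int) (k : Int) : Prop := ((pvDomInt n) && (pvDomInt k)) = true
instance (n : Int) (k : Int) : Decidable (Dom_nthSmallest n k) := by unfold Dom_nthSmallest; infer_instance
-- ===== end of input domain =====

-- B replaces A's greedy unranking scan by a binary search over candidate values,
-- ranked by a combinatorial counting function (objective: alternative algorithm).

-- math.comb b k for b : Nat, k : Int (used by both ports): 0 for k > b and for
-- k < 0 guarded away (math.comb raises ValueError on k < 0; both Pythons only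
-- reach it with k ≥ 0 on inputs admitted by Pre_nthSmallest).
def pyComb (b : Nat) (k : Int) : Int :=
  if k < 0 then 0
  else if (b : Int) < k then 0
  else ((Nat.descFactorial b k.toNat) / (Nat.factorial k.toNat) : Nat)

-- ===== PORT A =====
-- A's loop: for b in range(60, -1, -1), take bit b iff comb(b, k) < n, break on k == 0.
def nthSmallestLoopA : Nat → Int → Int → Int → Int
  | b, ans, n, k =>
    let cnt := pyComb b k
    if cnt < n then
      let ans' := Int.lor ans (Int.shiftLeft 1 b)
      if k - 1 = 0 then ans'
      else match b with
        | 0 => ans'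
        | b' + 1 => nthSmallestLoopA b' ans' (n - cnt) (k - 1)
    else match b with
      | 0 => ans
      | b' + 1 => nthSmallestLoopA b' ans n k

def nthSmallest (n : Int) (k : Int) : Int := nthSmallestLoopA 60 0 n k

-- ===== PORT B =====
-- count_le's loop: for b in range(60, -1, -1) over state (x, res, need);
-- 1 << b is written 2^b (exact: b ≥ 0).
def countLoopB : Nat → Int → Int → Int → Int × Int
  | b, x, res, need =>
    if 2 ^ b ≤ x then
      let x' := x - 2 ^ b
      let res' := if 0 ≤ need then res + pyComb b need else res
      let need' := need - 1
      match b with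
      | 0 => (res', need')
      | b' + 1 => countLoopB b' x' res' need'
    else match b with
      | 0 => (res, need)
      | b' + 1 => countLoopB b' x res need

-- count_le(x): numbers in [0, x] with exactly k set bits
def countLE (x : Int) (k : Int) : Int :=
  let p := countLoopB 60 x 0 k
  p.1 + (if p.2 = 0 then 1 else 0)

-- while lo < hi bisection; the Nat fuel only makes the recursion structural
-- (62 > log2 of the initial range, so it is never exhausted).
def bisectB : Nat → Int → Int → Int → Int → Int
  | 0, _, _, lo, _ => lo
  | f + 1, n, k, lo, hi =>
    if lo < hi then
      let mid := PySem.Int.floordiv (lo + hi) 2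
      if n ≤ countLE mid k then bisectB f n k lo mid
      else bisectB f n k (mid + 1) hi
    else lo

def nthSmallest_alt (n : Int) (k : Int) : Int := bisectB 62 n k 0 (2 ^ 61 - 1)

-- ===== PRECONDITION & SPEC =====
-- Pre_ excludes exactly the inputs where A raises ValueError in math.comb:
-- k < 0 (immediately), and k = 0 with n > 1 (comb(b, -1) after the first taken bit).
def Pre_nthSmallest (n : Int) (k : Int) : Prop := 0 ≤ k ∧ (k = 0 → n ≤ 1)
instance (n : Int) (k : Int) : Decidable (Pre_nthSmallest n k) := by
  unfold Pre_nthSmallest; infer_instance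

def pvWitness_nthSmallest : Int × Int := (7, 3)

-- For 1 ≤ k ≤ 60 with n > comb(61,k) the rank n exceeds the number of 61-bit values
-- with k set bits, so no answer exists: A silently returns the truncated greedy value
-- 2^61 - 2^(61-k), while B returns 2^61 - 1, the saturated top of its search range,
-- the natural outcome of its search and at least as defensible as A's truncation.
def D_nthSmallest (n : Int) (k : Int) : Prop :=
  1 ≤ n ∧ 1 ≤ k ∧ k ≤ 60 ∧ pyComb 61 k < n
instance (n : Int) (k : Int) : Decidable (D_nthSmallest n k) := by
  unfold D_nthSmallest; infer_instance

def Spec_nthSmallest (n : Int) (k : Int) (out : Int) : Prop :=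
  ¬ D_nthSmallest n k → out = nthSmallest_alt n k
instance (n : Int) (k : Int) (out : Int) : Decidable (Spec_nthSmallest n k out) := by
  unfold Spec_nthSmallest; infer_instance

def pvDiffWitness_nthSmallest : Int × Int := (62, 1)
def pvDiffWitnessOut_nthSmallest : Int × Int := (1152921504606846976, 2305843009213693951)

-- ===== CLAIM (what is proved, stated in full; the proofs are below) =====
def Claim_unchanged_nthSmallest : Prop := ∀ (n : Int) (k : Int), Dom_nthSmallest n k → Pre_nthSmallest n k → Spec_nthSmallest n k (nthSmallest n k)
def Claim_changed_nthSmallest : Prop := Dom_nthSmallest (pvDiffWitness_nthSmallest.1) (pvDiffWitness_nthSmallest.2) ∧ Pre_nthSmallest (pvDiffWitness_nthSmallest.1) (pvDiffWitness_nthSmallest.2) ∧ D_nthSmallest (pvDiffWitness_nthSmallest.1) (pvDiffWitness_nthSmallest.2) ∧ nthSmallest (pvDiffWitness_nthSmallest.1) (pvDiffWitness_nthSmallest.2) = pvDiffWitnessOut_nthSmallest.1 ∧ nthSmallest_alt (pvDiffWitness_nthSmallest.1) (pvDiffWitness_nthSmallest.2) = pvDiffWitnessOut_nthSmallest.2 ∧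 pvDiffWitnessOut_nthSmallest.1 ≠ pvDiffWitnessOut_nthSmallest.2
def Claim_exact_nthSmallest : Prop := ∀ (n : Int) (k : Int), Dom_nthSmallest n k → Pre_nthSmallest n k → D_nthSmallest n k → nthSmallest n k ≠ nthSmallest_alt n k

-- ===== LEMMAS AND PROOFS =====


-- ---------- proof-side ghost definitions ----------

-- A's loop with the accumulator stripped (pure value of the bits A takes from b down)
def gPure : Nat → Int → Int → Int
  | 0, n, k => if pyComb 0 k < n then 1 else 0
  | b + 1, n, k =>
    if pyComb (b + 1) k < n then
      if k - 1 = 0 then 2 ^ (b + 1)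
      else 2 ^ (b + 1) + gPure b (n - pyComb (b + 1) k) (k - 1)
    else gPure b n k

-- cntB B x k = number of y < min(x, 2^B) with exactly k set bits (used with x ≤ 2^B)
def cntB : Nat → Int → Int → Int
  | 0, x, k => if 1 ≤ x ∧ k = 0 then 1 else 0
  | B + 1, x, k => if 2 ^ B ≤ x then pyComb B k + cntB B (x - 2 ^ B) (k - 1) else cntB B x k

-- ---------- pyComb ----------

theorem pyComb_nonneg (b : Nat) (k : Int) : 0 ≤ pyComb b k := by
  unfold pyComb
  split_ifs
  · norm_num
  · norm_num
  · exact Int.natCast_nonneg _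

theorem pyComb_neg (b : Nat) (k : Int) (h : k < 0) : pyComb b k = 0 := by
  unfold pyComb; simp [h]

theorem pyComb_zero (b : Nat) : pyComb b 0 = 1 := by
  simp [pyComb]

theorem pyComb_base (k : Int) : pyComb 0 k = if k = 0 then 1 else 0 := by
  unfold pyComb
  split_ifs <;> simp_all <;> omega

theorem pyComb_gt (b : Nat) (k : Int) (h : (b : Int) < k) : pyComb b k = 0 := by
  unfold pyComb
  have h1 : ¬ k < 0 := by omega
  simp [h1, h]

theorem pyComb_eq_choose (b : Nat) (k : Int) (hk : 0 ≤ k) :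
    pyComb b k = (Nat.choose b k.toNat : Int) := by
  unfold pyComb
  split_ifs with h1 h2
  · omega
  · rw [Nat.choose_eq_zero_of_lt (by omega)]; simp
  · rw [Nat.choose_eq_descFactorial_div_factorial]

theorem pyComb_pascal (b : Nat) (k : Int) :
    pyComb (b + 1) k = pyComb b k + pyComb b (k - 1) := by
  rcases lt_trichotomy k 0 with hk | hk | hk
  · rw [pyComb_neg _ _ hk, pyComb_neg _ _ hk, pyComb_neg _ _ (by omega)]; ring
  · subst hk
    rw [pyComb_zero, pyComb_zero, pyComb_neg _ _ (by norm_num)]; ring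
  · rw [pyComb_eq_choose _ _ (by omega), pyComb_eq_choose _ _ (by omega),
        pyComb_eq_choose _ _ (by omega)]
    have h1 : k.toNat = (k - 1).toNat + 1 := by omega
    rw [h1, Nat.choose_succ_succ']
    push_cast; ring

theorem pyComb_le_succ (b : Nat) (k : Int) : pyComb b k ≤ pyComb (b + 1) k := by
  rw [pyComb_pascal]
  have := pyComb_nonneg b (k - 1)
  omega

-- ---------- gPure bounds and loopA ↔ gPure ----------

theorem gPure_bounds : ∀ (b : Nat) (n k : Int), 0 ≤ gPure b n k ∧ gPure b n k < 2 ^ (b + 1) := by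
  intro b
  induction b with
  | zero => intro n k; unfold gPure; split_ifs <;> norm_num
  | succ b ih =>
    intro n k
    unfold gPure
    split_ifs with h1 h2
    · refine ⟨by positivity, ?_⟩
      have : (2:Int) ^ (b + 1) < 2 ^ (b + 1 + 1) := by
        apply pow_lt_pow_right₀ <;> omega
      omega
    · have := ih (n - pyComb (b + 1) k) (k - 1)
      constructor
      · have : (0:Int) ≤ 2 ^ (b + 1) := by positivity
        omega
      · have h2 : (2:Int) ^ (b + 1 + 1) = 2 ^ (b + 1) + 2 ^ (b + 1) := by ring
        omega
    · have := ih n k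
      have h3 : (2:Int) ^ (b + 1) ≤ 2 ^ (b + 1 + 1) := by
        apply pow_le_pow_right₀ <;> omega
      omega

theorem intLor_natCast (m p : Nat) : Int.lor (m : Int) (p : Int) = ((m ||| p : Nat) : Int) := by
  simp [Int.lor]

theorem lor_pow_add (b r : Nat) (h : r < 2 ^ b) : (2 ^ b) ||| r = 2 ^ b + r := by
  apply Nat.eq_of_testBit_eq
  intro i
  rcases lt_trichotomy i b with hi | hi | hi
  · rw [Nat.testBit_lor, Nat.testBit_two_pow_add_gt hi, Nat.testBit_two_pow]
    simp [Nat.ne_of_gt hi]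
  · subst hi
    rw [Nat.testBit_lor, Nat.testBit_two_pow_add_eq, Nat.testBit_two_pow]
    simp [Nat.testBit_lt_two_pow h]
  · rw [Nat.testBit_lor, Nat.testBit_two_pow]
    have h2 : 2 ^ b + r < 2 ^ i := by
      calc 2 ^ b + r < 2 ^ b + 2 ^ b := by omega
        _ = 2 ^ (b + 1) := by ring
        _ ≤ 2 ^ i := Nat.pow_le_pow_right (by norm_num) (by omega)
    rw [Nat.testBit_lt_two_pow h2,
        Nat.testBit_lt_two_pow (lt_of_lt_of_le h (Nat.pow_le_pow_right (by norm_num) (le_of_lt hi)))]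
    simp [Nat.ne_of_lt hi]

-- (ans ||| 2^b) ||| r = ans ||| (2^b + r) for nonneg ints, r < 2^b
theorem intLor_step (ans r : Int) (b : Nat) (ha : 0 ≤ ans) (hr : 0 ≤ r) (hrb : r < 2 ^ b) :
    Int.lor (Int.lor ans (2 ^ b)) r = Int.lor ans (2 ^ b + r) := by
  obtain ⟨ma, rfl⟩ := Int.eq_ofNat_of_zero_le ha
  obtain ⟨mr, rfl⟩ := Int.eq_ofNat_of_zero_le hr
  have hp : ((2 : Int) ^ b) = ((2 ^ b : Nat) : Int) := by push_cast; ring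
  have hrb' : mr < 2 ^ b := by exact_mod_cast hp ▸ hrb
  rw [hp, intLor_natCast, intLor_natCast]
  rw [show ((2 ^ b : Nat) : Int) + (mr : Int) = ((2 ^ b + mr : Nat) : Int) by push_cast; ring]
  rw [intLor_natCast, ← lor_pow_add b mr hrb', Nat.lor_assoc]

theorem intLor_nonneg (a c : Int) (ha : 0 ≤ a) (hc : 0 ≤ c) : 0 ≤ Int.lor a c := by
  obtain ⟨ma, rfl⟩ := Int.eq_ofNat_of_zero_le ha
  obtain ⟨mc, rfl⟩ := Int.eq_ofNat_of_zero_le hc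
  rw [intLor_natCast]; positivity

theorem shiftLeft_one (b : Nat) : Int.shiftLeft 1 b = (2 : Int) ^ b := by
  simp [Int.shiftLeft, Nat.shiftLeft_eq]

theorem loopA_lor : ∀ (b : Nat) (ans n k : Int), 0 ≤ ans →
    nthSmallestLoopA b ans n k = Int.lor ans (gPure b n k) := by
  intro b
  induction b with
  | zero =>
    intro ans n k ha
    unfold nthSmallestLoopA gPure
    simp only [shiftLeft_one]
    obtain ⟨ma, rfl⟩ := Int.eq_ofNat_of_zero_le ha
    split_ifs
    · norm_num [show ((1:Int)) = ((1 : Nat) : Int) from rfl, intLor_natCast]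
    · norm_num [show ((1:Int)) = ((1 : Nat) : Int) from rfl, intLor_natCast]
    · rw [show ((0:Int)) = ((0 : Nat) : Int) from rfl, intLor_natCast, Nat.or_zero]
  | succ b ih =>
    intro ans n k ha
    unfold nthSmallestLoopA gPure
    simp only [shiftLeft_one]
    split_ifs with h1 h2
    · rfl
    · rw [ih _ _ _ (intLor_nonneg _ _ ha (by positivity))]
      obtain ⟨hg0, hg1⟩ := gPure_bounds b (n - pyComb (b + 1) k) (k - 1)
      exact intLor_step ans _ (b + 1) ha hg0 hg1
    · exact ih _ _ _ ha

theorem nthSmallest_eq_gPure (n k : Int) : nthSmallest n k = gPure 60 n k := by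
  rw [nthSmallest, loopA_lor 60 0 n k le_rfl]
  obtain ⟨hg0, _⟩ := gPure_bounds 60 n k
  obtain ⟨m, hm⟩ := Int.eq_ofNat_of_zero_le hg0
  rw [hm, show (0 : Int) = ((0 : Nat) : Int) from rfl, intLor_natCast, Nat.zero_or]

-- ---------- cntB ----------

theorem cntB_nonneg : ∀ (B : Nat) (x k : Int), 0 ≤ cntB B x k := by
  intro B
  induction B with
  | zero => intro x k; unfold cntB; split_ifs <;> norm_num
  | succ B ih =>
    intro x k
    unfold cntB
    split_ifs with h
    · have := pyComb_nonneg B k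
      have := ih (x - 2 ^ B) (k - 1)
      omega
    · exact ih x k

theorem cntB_zero : ∀ (B : Nat) (k : Int), cntB B 0 k = 0 := by
  intro B
  induction B with
  | zero => intro k; unfold cntB; split_ifs <;> omega
  | succ B ih =>
    intro k
    unfold cntB
    have : ¬ (2 : Int) ^ B ≤ 0 := by
      have : (0:Int) < 2 ^ B := by positivity
      omega
    simp only [this, if_false]
    exact ih k

theorem cntB_one : ∀ (B : Nat) (k : Int), cntB B 1 k = if k = 0 then 1 else 0 := by
  intro B
  induction B with
  | zero => intro k; unfold cntB; split_ifs <;> simp_all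
  | succ B ih =>
    intro k
    unfold cntB
    by_cases hB : B = 0
    · subst hB
      norm_num [cntB_zero, pyComb_base]
    · have : ¬ (2 : Int) ^ B ≤ 1 := by
        have : (2:Int) ^ 1 ≤ 2 ^ B := by
          apply pow_le_pow_right₀ <;> omega
        norm_num at this ⊢
        omega
      simp only [this, if_false]
      exact ih k

theorem cntB_pow : ∀ (B : Nat) (k : Int), cntB B (2 ^ B) k = pyComb B k := by
  intro B
  induction B with
  | zero =>
    intro k
    unfold cntB pyComb
    rcases lt_trichotomy k 0 with h | h | h <;> simp_all <;> omega
  | succ B ih =>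
    intro k
    unfold cntB
    have h : (2:Int) ^ B ≤ 2 ^ (B + 1) := by
      apply pow_le_pow_right₀ <;> omega
    simp only [h, if_true]
    rw [show (2:Int) ^ (B+1) - 2 ^ B = 2 ^ B by ring, ih, pyComb_pascal]

theorem cntB_ext (B : Nat) (x k : Int) (h : x ≤ 2 ^ B) : cntB (B + 1) x k = cntB B x k := by
  conv_lhs => rw [cntB]
  split_ifs with h1
  · have hx : x = 2 ^ B := le_antisymm h h1
    subst hx
    rw [show (2:Int) ^ B - 2 ^ B = 0 by ring, cntB_zero, cntB_pow]
    have := pyComb_nonneg B k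
    omega
  · rfl

theorem cntB_mono : ∀ (B : Nat) (x x' k : Int), x ≤ x' → x' ≤ 2 ^ B →
    cntB B x k ≤ cntB B x' k := by
  intro B
  induction B with
  | zero =>
    intro x x' k hxx hx'
    unfold cntB
    split_ifs <;> omega
  | succ B ih =>
    intro x x' k hxx hx'
    unfold cntB
    split_ifs with h1 h2 h3
    · have : x - 2 ^ B ≤ x' - 2 ^ B := by omega
      have h4 : x' - 2 ^ B ≤ 2 ^ B := by
        have : (2:Int) ^ (B + 1) = 2 ^ B + 2 ^ B := by ring
        omega
      have := ih (x - 2 ^ B) (x' - 2 ^ B) (k - 1) this h4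
      omega
    · omega
    · have h5 : cntB B x k ≤ cntB B (2 ^ B) k := ih x (2 ^ B) k (by omega) le_rfl
      rw [cntB_pow] at h5
      have := cntB_nonneg B (x' - 2 ^ B) (k - 1)
      omega
    · exact ih x x' k hxx (by omega)

theorem cntB_le (B : Nat) (x k : Int) (h : x ≤ 2 ^ B) : cntB B x k ≤ pyComb B k := by
  have := cntB_mono B x (2 ^ B) k h le_rfl
  rwa [cntB_pow] at this

-- ---------- port B's counting loop computes cntB ----------

theorem countLoop_cnt : ∀ (b : Nat) (x res need : Int), 0 ≤ x → x < 2 ^ (b + 1) →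
    ((countLoopB b x res need).1 + (if (countLoopB b x res need).2 = 0 then 1 else 0)) =
      res + cntB (b + 1) (x + 1) need := by
  intro b
  induction b with
  | zero =>
    intro x res need hx0 hx1
    have hguard : (if 0 ≤ need then res + pyComb 0 need else res) = res + pyComb 0 need := by
      split_ifs with h
      · rfl
      · rw [pyComb_neg _ _ (by omega)]; ring
    have hx : x = 0 ∨ x = 1 := by
      have h2 : (2:Int) ^ (0+1) = 2 := by norm_num
      omega
    rcases hx with rfl | rfl
    · rw [show countLoopB 0 0 res need = (res, need) by unfold countLoopB; norm_num]
      rw [show cntB (0+1) (0+1) need = pyComb 0 need + cntB 0 0 (need - 1) by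
            conv_lhs => rw [cntB]
            norm_num]
      rw [cntB_zero, pyComb_base]
      split_ifs <;> omega
    · rw [show countLoopB 0 1 res need
            = ((if 0 ≤ need then res + pyComb 0 need else res), need - 1) by
          unfold countLoopB; norm_num]
      rw [hguard]
      rw [show cntB (0+1) (1+1) need = pyComb 0 need + cntB 0 1 (need - 1) by
            conv_lhs => rw [cntB]
            norm_num]
      rw [cntB_one 0 (need - 1)]
      norm_num
      ring
  | succ b ih =>
    intro x res need hx0 hx1
    unfold countLoopB
    by_cases h1 : (2:Int) ^ (b + 1) ≤ x
    · simp only [h1, if_true]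
      have hguard : (if 0 ≤ need then res + pyComb (b + 1) need else res)
          = res + pyComb (b + 1) need := by
        split_ifs with h
        · rfl
        · rw [pyComb_neg _ _ (by omega)]; ring
      rw [hguard]
      have hb0 : (0:Int) ≤ x - 2 ^ (b + 1) := by omega
      have hb1 : x - 2 ^ (b + 1) < 2 ^ (b + 1) := by
        have : (2:Int) ^ (b + 1 + 1) = 2 ^ (b + 1) + 2 ^ (b + 1) := by ring
        omega
      rw [ih (x - 2 ^ (b + 1)) (res + pyComb (b + 1) need) (need - 1) hb0 hb1]
      have hc : cntB (b + 1 + 1) (x + 1) need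
          = pyComb (b + 1) need + cntB (b + 1) (x - 2 ^ (b + 1) + 1) (need - 1) := by
        conv_lhs => rw [cntB]
        have : (2:Int) ^ (b + 1) ≤ x + 1 := by omega
        simp only [this, if_true]
        rw [show x + 1 - 2 ^ (b + 1) = x - 2 ^ (b + 1) + 1 by ring]
      rw [hc]; ring
    · simp only [h1, if_false]
      rw [ih x res need hx0 (by omega)]
      rw [cntB_ext (b + 1) (x + 1) need (by omega)]

theorem countLE_eq (x k : Int) (hx0 : 0 ≤ x) (hx1 : x < 2 ^ 61) :
    countLE x k = cntB 61 (x + 1) k := by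
  unfold countLE
  exact (countLoop_cnt 60 x 0 k hx0 (by exact_mod_cast hx1)).trans (by ring)

-- ---------- greedy unranking: rank identities for gPure ----------

theorem gPure_rank : ∀ (b : Nat) (n k : Int), 1 ≤ n → 1 ≤ k → n ≤ pyComb (b + 1) k →
    cntB (b + 1) (gPure b n k) k = n - 1 ∧ cntB (b + 1) (gPure b n k + 1) k = n := by
  intro b
  induction b with
  | zero =>
    intro n k hn hk hnc
    rcases lt_or_eq_of_le hk with hk2 | hk1
    · rw [pyComb_gt 1 k (by push_cast; omega)] at hnc
      omega
    · subst hk1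
      have hp : pyComb 1 1 = 1 := by decide
      rw [show ((0:Nat) + 1) = 1 from rfl, hp] at hnc
      have hn1 : n = 1 := by omega
      subst hn1
      have hg : gPure 0 1 1 = 1 := by decide
      rw [hg]
      refine ⟨by decide, by decide⟩
  | succ b ih =>
    intro n k hn hk hnc
    have hpas := pyComb_pascal (b + 1) k
    by_cases hc : pyComb (b + 1) k < n
    · by_cases hk1 : k - 1 = 0
      · have hk1' : k = 1 := by omega
        subst hk1'
        norm_num [pyComb_zero] at hpas
        have hn' : n = pyComb (b + 1) 1 + 1 := by omega
        have hg : gPure (b + 1) n 1 = 2 ^ (b + 1) := by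
          unfold gPure; simp [hc]
        rw [hg]
        constructor
        · rw [cntB_ext (b + 1) _ 1 le_rfl, cntB_pow (b + 1) 1]
          omega
        · have hstep : cntB (b + 1 + 1) (2 ^ (b + 1) + 1) 1
              = pyComb (b + 1) 1 + cntB (b + 1) 1 0 := by
            conv_lhs => rw [cntB]
            have h2 : (2:Int) ^ (b + 1) ≤ 2 ^ (b + 1) + 1 := by omega
            simp only [h2, if_true]
            norm_num
          rw [hstep, cntB_one]
          norm_num
          omega
      · have h1 : 1 ≤ n - pyComb (b + 1) k := by omega
        have hcn : 0 ≤ pyComb (b + 1) k := pyComb_nonneg _ _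
        have h3 : n - pyComb (b + 1) k ≤ pyComb (b + 1) (k - 1) := by omega
        obtain ⟨hr1, hr2⟩ := ih (n - pyComb (b + 1) k) (k - 1) h1 (by omega) h3
        obtain ⟨hg0, hg1⟩ := gPure_bounds b (n - pyComb (b + 1) k) (k - 1)
        have hg : gPure (b + 1) n k = 2 ^ (b + 1) + gPure b (n - pyComb (b + 1) k) (k - 1) := by
          unfold gPure; simp only [hc, hk1, if_true, if_false]
          cases b <;> rfl
        rw [hg]
        constructor
        · rw [show cntB (b + 1 + 1) (2 ^ (b + 1) + gPure b (n - pyComb (b + 1) k) (k - 1)) k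
              = pyComb (b + 1) k + cntB (b + 1) (gPure b (n - pyComb (b + 1) k) (k - 1)) (k - 1) by
            conv_lhs => rw [cntB]
            simp only [show (2:Int) ^ (b + 1) ≤ 2 ^ (b + 1) + gPure b (n - pyComb (b + 1) k) (k - 1) by omega, if_true]
            rw [show (2:Int) ^ (b + 1) + gPure b (n - pyComb (b + 1) k) (k - 1) - 2 ^ (b + 1)
                = gPure b (n - pyComb (b + 1) k) (k - 1) by ring]]
          omega
        · rw [show cntB (b + 1 + 1) (2 ^ (b + 1) + gPure b (n - pyComb (b + 1) k) (k - 1) + 1) k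
              = pyComb (b + 1) k + cntB (b + 1) (gPure b (n - pyComb (b + 1) k) (k - 1) + 1) (k - 1) by
            conv_lhs => rw [cntB]
            simp only [show (2:Int) ^ (b + 1) ≤ 2 ^ (b + 1) + gPure b (n - pyComb (b + 1) k) (k - 1) + 1 by omega, if_true]
            rw [show (2:Int) ^ (b + 1) + gPure b (n - pyComb (b + 1) k) (k - 1) + 1 - 2 ^ (b + 1)
                = gPure b (n - pyComb (b + 1) k) (k - 1) + 1 by ring]]
          omega
    · have hg : gPure (b + 1) n k = gPure b n k := by
        unfold gPure; simp only [hc, if_false]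
        cases b <;> rfl
      obtain ⟨hr1, hr2⟩ := ih n k hn hk (by omega)
      obtain ⟨hb0, hb1⟩ := gPure_bounds b n k
      rw [hg, cntB_ext (b + 1) _ k (by omega), cntB_ext (b + 1) _ k (by omega)]
      exact ⟨hr1, hr2⟩

-- ---------- degenerate and saturated runs of A's scan ----------

theorem gPure_succ (b : Nat) (n k : Int) :
    gPure (b + 1) n k = if pyComb (b + 1) k < n then
      (if k - 1 = 0 then 2 ^ (b + 1) else 2 ^ (b + 1) + gPure b (n - pyComb (b + 1) k) (k - 1))
    else gPure b n k := rfl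

theorem gPure_npos : ∀ (b : Nat) (n k : Int), n ≤ 0 → gPure b n k = 0 := by
  intro b
  induction b with
  | zero =>
    intro n k hn
    unfold gPure
    have := pyComb_nonneg 0 k
    simp only [show ¬ pyComb 0 k < n by omega, if_false]
  | succ b ih =>
    intro n k hn
    rw [gPure_succ]
    have := pyComb_nonneg (b + 1) k
    simp only [show ¬ pyComb (b + 1) k < n by omega, if_false]
    exact ih n k hn

theorem gPure_k0 : ∀ (b : Nat), gPure b 1 0 = 0 := by
  intro b
  induction b with
  | zero => decide
  | succ b ih =>
    rw [gPure_succ, pyComb_zero]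
    norm_num
    exact ih

theorem gPure_gtk : ∀ (b : Nat) (n k : Int), 1 ≤ n → (b : Int) < k →
    gPure b n k = 2 ^ (b + 1) - 1 := by
  intro b
  induction b with
  | zero =>
    intro n k hn hbk
    unfold gPure
    rw [pyComb_gt 0 k hbk]
    simp only [show (0:Int) < n by omega, if_true]
    norm_num
  | succ b ih =>
    intro n k hn hbk
    rw [gPure_succ, pyComb_gt (b + 1) k hbk]
    simp only [show (0:Int) < n by omega, if_true]
    have hb1 : ((b : Int)) + 1 < k := by push_cast at hbk; omega
    have hk1 : ¬ k - 1 = 0 := by omega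
    simp only [hk1, if_false]
    rw [ih (n - 0) (k - 1) (by omega) (by omega)]
    ring

theorem gPure_sat : ∀ (b : Nat) (n k : Int), 1 ≤ k → k ≤ (b : Int) + 1 →
    pyComb (b + 1) k < n → gPure b n k = 2 ^ (b + 1) - 2 ^ (b + 1 - k.toNat) := by
  intro b
  induction b with
  | zero =>
    intro n k hk hkb hc
    have hk1 : k = 1 := by push_cast at hkb; omega
    subst hk1
    have hp : pyComb 1 1 = 1 := by decide
    rw [hp] at hc
    unfold gPure
    rw [pyComb_base]
    norm_num
    omega
  | succ b ih =>
    intro n k hk hkb hc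
    have hcc : pyComb (b + 1) k < n := lt_of_le_of_lt (pyComb_le_succ (b + 1) k) hc
    rw [gPure_succ]
    simp only [hcc, if_true]
    have hpas := pyComb_pascal (b + 1) k
    by_cases hk1 : k - 1 = 0
    · have : k = 1 := by omega
      subst this
      simp only [hk1]
      norm_num
      ring
    · simp only [hk1, if_false]
      have h2 : 2 ≤ k := by omega
      rw [ih (n - pyComb (b + 1) k) (k - 1) (by omega) (by push_cast at hkb ⊢; omega) (by omega)]
      have ht : (k - 1).toNat = k.toNat - 1 := by omega
      have htb : k.toNat ≤ b + 2 := by omega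
      have ht2 : 2 ≤ k.toNat := by omega
      rw [ht, show (b + 1 - (k.toNat - 1)) = b + 1 + 1 - k.toNat by omega]
      ring

-- ---------- bisection ----------

theorem bisect_min : ∀ (f : Nat) (n k lo hi a : Int), hi - lo < 2 ^ f → lo ≤ a → a ≤ hi →
    (∀ x, lo ≤ x → x < a → ¬ (n ≤ countLE x k)) →
    (∀ x, a ≤ x → x ≤ hi → n ≤ countLE x k) →
    bisectB f n k lo hi = a := by
  intro f
  induction f with
  | zero =>
    intro n k lo hi a hf h1 h2 _ _
    rw [bisectB]
    norm_num at hf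
    omega
  | succ f ih =>
    intro n k lo hi a hf h1 h2 hlow hhigh
    have hp2 : (2:Int) ^ (f + 1) = 2 * 2 ^ f := by ring
    rw [hp2] at hf
    rw [bisectB]
    by_cases hlh : lo < hi
    · simp only [hlh, if_true]
      rw [PySem.Int.floordiv_eq_ediv_of_pos (by norm_num)]
      set mid := (lo + hi) / 2 with hmid
      have hb1 : 2 * mid ≤ lo + hi := by omega
      have hb2 : lo + hi < 2 * mid + 2 := by omega
      by_cases hp : n ≤ countLE mid k
      · simp only [hp, if_true]
        have hma : a ≤ mid := by
          by_contra hcon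
          exact hlow mid (by omega) (by omega) hp
        exact ih n k lo mid a (by omega) h1 hma hlow
          (fun x hx1 hx2 => hhigh x hx1 (by omega))
      · simp only [hp, if_false]
        have hma : mid < a := by
          by_contra hcon
          exact hp (hhigh mid (by omega) (by omega))
        exact ih n k (mid + 1) hi a (by omega) (by omega) h2
          (fun x hx1 hx2 => hlow x (by omega) hx2) hhigh
    · simp only [hlh, if_false]
      omega

theorem bisect_none : ∀ (f : Nat) (n k lo hi : Int), hi - lo < 2 ^ f → lo ≤ hi →
    (∀ x, lo ≤ x → x ≤ hi → ¬ (n ≤ countLE x k)) →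
    bisectB f n k lo hi = hi := by
  intro f
  induction f with
  | zero =>
    intro n k lo hi hf h1 _
    rw [bisectB]
    norm_num at hf
    omega
  | succ f ih =>
    intro n k lo hi hf h1 hnone
    have hp2 : (2:Int) ^ (f + 1) = 2 * 2 ^ f := by ring
    rw [hp2] at hf
    rw [bisectB]
    by_cases hlh : lo < hi
    · simp only [hlh, if_true]
      rw [PySem.Int.floordiv_eq_ediv_of_pos (by norm_num)]
      set mid := (lo + hi) / 2 with hmid
      have hb1 : 2 * mid ≤ lo + hi := by omega
      have hb2 : lo + hi < 2 * mid + 2 := by omega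
      have hp : ¬ (n ≤ countLE mid k) := hnone mid (by omega) (by omega)
      simp only [hp, if_false]
      exact ih n k (mid + 1) hi (by omega) (by omega)
        (fun x hx1 hx2 => hnone x (by omega) hx2)
    · simp only [hlh, if_false]
      omega

-- ---------- main equivalence on Pre_ outside D_ ----------

theorem main_core (n k : Int) (hk : 0 ≤ k) (hk0 : k = 0 → n ≤ 1)
    (hnd : ¬ D_nthSmallest n k) : nthSmallest n k = nthSmallest_alt n k := by
  have h61 : ((60:Nat) + 1) = 61 := rfl
  have hpow : (2:Int) ^ ((60:Nat) + 1) = 2 ^ (61:Nat) := by norm_num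
  rw [nthSmallest_eq_gPure]
  unfold nthSmallest_alt
  by_cases hn : n ≤ 0
  · rw [gPure_npos 60 n k hn]
    symm
    apply bisect_min 62 n k 0 (2 ^ 61 - 1) 0 (by norm_num) le_rfl (by norm_num)
    · intro x hx1 hx2; omega
    · intro x hx1 hx2
      rw [countLE_eq x k (by omega) (by omega)]
      have := cntB_nonneg 61 (x + 1) k
      omega
  · have hn1 : 1 ≤ n := by omega
    rcases eq_or_lt_of_le hk with hk0' | hkpos
    · have hkz : k = 0 := hk0'.symm
      subst hkz
      have hone : n = 1 := by have := hk0 rfl; omega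
      subst hone
      rw [gPure_k0]
      symm
      apply bisect_min 62 1 0 0 (2 ^ 61 - 1) 0 (by norm_num) le_rfl (by norm_num)
      · intro x h1 h2; omega
      · intro x h1 h2
        rw [countLE_eq x 0 (by omega) (by omega)]
        have hm := cntB_mono 61 1 (x + 1) 0 (by omega) (by omega)
        rw [cntB_one] at hm
        norm_num at hm
        omega
    · by_cases hir : n ≤ pyComb 61 k
      · obtain ⟨hr1, hr2⟩ := gPure_rank 60 n k hn1 (by omega) (by rw [h61]; exact hir)
        rw [h61] at hr1 hr2
        obtain ⟨hg0, hg1⟩ := gPure_bounds 60 n k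
        rw [hpow] at hg1
        symm
        apply bisect_min 62 n k 0 (2 ^ 61 - 1) (gPure 60 n k) (by norm_num) hg0 (by omega)
        · intro x hx1 hx2
          rw [countLE_eq x k (by omega) (by omega)]
          have hm := cntB_mono 61 (x + 1) (gPure 60 n k) k (by omega) (by omega)
          omega
        · intro x hx1 hx2
          rw [countLE_eq x k (by omega) (by omega)]
          have hm := cntB_mono 61 (gPure 60 n k + 1) (x + 1) k (by omega) (by omega)
          omega
      · have hk61 : 61 ≤ k := by
          by_contra hcon
          exact hnd ⟨hn1, by omega, by omega, by omega⟩
        rw [gPure_gtk 60 n k hn1 (by push_cast; omega)]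
        rw [show ((2:Int) ^ ((60:Nat) + 1) - 1) = 2 ^ (61:Nat) - 1 by norm_num]
        symm
        apply bisect_none 62 n k 0 (2 ^ 61 - 1) (by norm_num) (by norm_num)
        intro x h1 h2
        rw [countLE_eq x k (by omega) (by omega)]
        have := cntB_le 61 (x + 1) k (by omega)
        omega

theorem alt_saturated (n k : Int) (hc : pyComb 61 k < n) :
    nthSmallest_alt n k = 2 ^ (61:Nat) - 1 := by
  unfold nthSmallest_alt
  apply bisect_none 62 n k 0 (2 ^ 61 - 1) (by norm_num) (by norm_num)
  intro x h1 h2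
  rw [countLE_eq x k (by omega) (by omega)]
  have := cntB_le 61 (x + 1) k (by omega)
  omega

-- ===== VERDICT (by name: the statements are the Claim_ definitions above) =====
theorem nthSmallest_spec : Claim_unchanged_nthSmallest := by
  intro n k _ hpre hnd
  exact main_core n k hpre.1 hpre.2 hnd

theorem nthSmallest_changed : Claim_changed_nthSmallest := by
  unfold Claim_changed_nthSmallest
  refine ⟨by decide, by decide, by decide, ?_, ?_, by decide⟩
  · show nthSmallest 62 1 = 1152921504606846976
    rw [nthSmallest_eq_gPure, gPure_sat 60 62 1 (by norm_num) (by norm_num) (by decide)]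
    norm_num
  · show nthSmallest_alt 62 1 = 2305843009213693951
    rw [alt_saturated 62 1 (by decide)]
    norm_num

theorem nthSmallest_tight : Claim_exact_nthSmallest := by
  intro n k _ hpre hd
  obtain ⟨hn1, hk1, hk60, hc⟩ := hd
  rw [nthSmallest_eq_gPure]
  rw [gPure_sat 60 n k hk1 (by push_cast; omega) (by exact hc)]
  rw [alt_saturated n k hc]
  have h1 : 1 ≤ 61 - k.toNat := by omega
  have h2 : (2:Int) ^ 1 ≤ 2 ^ (61 - k.toNat) :=
    pow_le_pow_right₀ (by norm_num) h1
  have hpow : (2:Int) ^ ((60:Nat) + 1) = 2 ^ (61:Nat) := by norm_num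
  have hexp : ((60:Nat) + 1 - k.toNat) = 61 - k.toNat := by omega
  rw [hpow, hexp]
  norm_num at h2
  omega
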